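-- pv_equiv track=rewrite | github.com/MahirJhaveri/CompetitiveProgramming | Codeforces/NewYearPermutations/solution.py | getKthCycle
-- ===== SOURCE A (Python) =====
-- class DSU:
--     def __init__(self, n):
--         self.hash = {}
--         for i in range(1, n+1):
--             self.hash[i] = [i]
--
--     def union(self, i, j):
--         lst1 = self.hash[i]
--         lst2 = self.hash[j]
--         lst1.extend(lst2)
--         for element in lst2:
--             self.hash[element] = lst1
--
--     def same_set(self, i, j):
--         return j in self.hash[i]
--
-- def getKthCycle(n, k, fact):
--     lst = [i-1 for i in range(n+1)]
--     # num of ends that still dont have incoming link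
--     num_open = n
--
--     dsu = DSU(n)
--     dsu.union(1, n)
--     lst[1] = n
--     num_open -= 1
--
--     pos = 2
--     while pos < n:
--         i = pos
--         while i <= n:
--             if dsu.same_set(pos, lst[i]):
--                 pass
--             else:
--                 if k <= fact[num_open-2]:
--                     break
--                 else:
--                     k -= fact[num_open-2]
--             i += 1
--
--         if i == n+1:  # k is too large
--             return None
--         else:
--             num_open -= 1
--
--             dsu.union(pos, lst[i])
--
--             # move the element at pos i to "pos"
--             # while keeping the sorted-ness of lst
--             temp = lst[i]
--             j = i
--             while j > pos:
--                 lst[j] = lst[j-1]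
--                 j -= 1
--             lst[pos] = temp
--
--         pos += 1
--     return lst[1:]
-- ===== SOURCE B (Python) =====
-- def getKthCycle(n, k, fact):
--     # Arithmetic unranking without a DSU: at each position exactly one
--     # remaining value is forbidden (the source of pos's chain, kept in an
--     # endpoint-pairing map e), so the chosen candidate's index is computed by
--     # one ceiling division instead of a per-candidate subtraction scan.
--     e = {i: i for i in range(1, n + 1)}
--     e[1], e[n] = n, 1
--     remaining = list(range(1, n))
--     result = [n]
--     for pos in range(2, n):
--         w = fact[n - pos - 1]
--         if k <= w:
--             q = 1
--         elif w > 0: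
--             q = -((-k) // w)
--         else:
--             return None
--         if q > len(remaining) - 1:
--             return None
--         k -= (q - 1) * w
--         f = e[pos]
--         idx = remaining.index(f)
--         j = q - 1 if q - 1 < idx else q
--         v = remaining.pop(j)
--         t = e[v]
--         e[f], e[t] = t, f
--         result.append(v)
--     return result + remaining
-- ===== Notes on version B (the rewrite author's own statement) =====
-- stated objective: faster
-- what changed: B drops the DSU and the per-candidate subtraction scan entirely: it tracks each chain's two endpoints in a pairing map, so exactly one remaining value is forbidden per position, and picks the candidate's index with one ceiling division (-((-k)//w)) plus one list lookup instead of A's scan that tests DSU membership and subtracts the weight candidate by candidate.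
import Mathlib
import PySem

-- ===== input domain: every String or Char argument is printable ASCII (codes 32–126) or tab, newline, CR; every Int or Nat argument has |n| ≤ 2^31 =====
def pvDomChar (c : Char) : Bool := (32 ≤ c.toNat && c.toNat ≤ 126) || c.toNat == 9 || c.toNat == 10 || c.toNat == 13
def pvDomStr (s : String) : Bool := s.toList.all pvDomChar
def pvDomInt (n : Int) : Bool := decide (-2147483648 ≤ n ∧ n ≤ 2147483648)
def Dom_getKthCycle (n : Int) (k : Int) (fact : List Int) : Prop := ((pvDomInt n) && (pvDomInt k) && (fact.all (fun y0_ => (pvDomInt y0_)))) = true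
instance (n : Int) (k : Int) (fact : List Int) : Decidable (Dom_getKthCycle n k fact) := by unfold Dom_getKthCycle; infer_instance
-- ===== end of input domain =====

-- B drops A's DSU entirely: at each position exactly one remaining value is forbidden
-- (the source of pos's chain, kept in an endpoint-pairing map), so B picks the candidate
-- index by one ceiling division instead of A's per-candidate subtraction scan over the
-- DSU; equivalence of the RETURN value is proved on Pre_ (no argument is mutated).

-- ===== PORT A =====
-- DSU.__init__: hash[i] = [i] for i in 1..n
def pvDsuInit (n : Int) : PySem.Dict Int (List Int) :=
  (PySem.List.pyRange 1 (n + 1) 1).foldl (fun d i => d.insert i [i]) PySem.Dict.empty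

-- DSU.union: lst1.extend(lst2) mutates the one list object shared by exactly the members
-- of lst1 (hash[e] is e's component list), and the loop re-points every member of lst2;
-- modelled exactly by mapping every element of lst1 ++ lst2 to lst1 ++ lst2.
-- hash[i]/hash[j] lookups are getD []: a KeyError is impossible for arguments in 1..n.
def pvDsuUnion (d : PySem.Dict Int (List Int)) (i j : Int) : PySem.Dict Int (List Int) :=
  let l1 := d.getD i []
  let l2 := d.getD j []
  let nl := l1 ++ l2
  nl.foldl (fun d e => d.insert e nl) d

-- DSU.same_set: j in self.hash[i]
def pvSameSet (d : PySem.Dict Int (List Int)) (i j : Int) : Bool :=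
  (d.getD i []).contains j

-- inner `while i <= n` loop; fuel = (n + 1 - i).toNat at entry, so fuel 0 ↔ i = n + 1.
-- fact[num_open-2] is pyGetD with default 0: under Pre_ the index is always in range.
def pvInnerA (fact lst : List Int) (d : PySem.Dict Int (List Int)) (pos numOpen : Int) :
    Nat → Int → Int → Int × Int
  | 0, i, k => (i, k)
  | fuel + 1, i, k =>
    if pvSameSet d pos (PySem.List.pyGetD lst i 0) then
      pvInnerA fact lst d pos numOpen fuel (i + 1) k
    else if k ≤ PySem.List.pyGetD fact (numOpen - 2) 0 then (i, k)
    else pvInnerA fact lst d pos numOpen fuel (i + 1) (k - PySem.List.pyGetD fact (numOpen - 2) 0)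

-- `while j > pos: lst[j] = lst[j-1]; j -= 1`; fuel = (j - pos).toNat at entry.
def pvShiftA : List Int → Int → Nat → List Int
  | lst, _, 0 => lst
  | lst, j, fuel + 1 =>
    pvShiftA (PySem.List.pySetD lst j (PySem.List.pyGetD lst (j - 1) 0)) (j - 1) fuel

-- outer `while pos < n` loop; fuel = (n - pos).toNat at entry, so fuel 0 ↔ pos ≥ n.
def pvOuterA (n : Int) (fact : List Int) :
    Nat → Int → List Int → PySem.Dict Int (List Int) → Int → Int → Option (List Int)
  | 0, _, lst, _, _, _ => some (PySem.List.slice lst (some 1) none)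
  | fuel + 1, pos, lst, d, numOpen, k =>
    match pvInnerA fact lst d pos numOpen (n + 1 - pos).toNat pos k with
    | (i, k') =>
      if i = n + 1 then none
      else
        let temp := PySem.List.pyGetD lst i 0
        let d' := pvDsuUnion d pos temp
        let lst' := PySem.List.pySetD (pvShiftA lst i (i - pos).toNat) pos temp
        pvOuterA n fact fuel (pos + 1) lst' d' (numOpen - 1) k'

def getKthCycle (n : Int) (k : Int) (fact : List Int) : Option (List Int) :=
  let lst := PySem.List.pySetD ((PySem.List.pyRange 0 (n + 1) 1).map (fun i => i - 1)) 1 n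
  let d := pvDsuUnion (pvDsuInit n) 1 n
  pvOuterA n fact (n - 2).toNat 2 lst d (n - 1) k

-- ===== PORT B =====
-- q = 1 / -((-k) // w) / early `return None`, exactly Source B's three branches.
def pvQ (k w : Int) : Option Int :=
  if k ≤ w then some 1
  else if 0 < w then some (-(PySem.Int.floordiv (-k) w))
  else none

-- e = {i: i for i in range(1, n+1)}; e[1], e[n] = n, 1
def pvEInit (n : Int) : PySem.Dict Int Int :=
  (((PySem.List.pyRange 1 (n + 1) 1).foldl (fun e i => e.insert i i)
      PySem.Dict.empty).insert 1 n).insert n 1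

-- `for pos in range(2, n)` loop; fuel = (n - pos).toNat.
def pvLoopB (n : Int) (fact : List Int) :
    Nat → Int → Int → List Int → List Int → PySem.Dict Int Int → Option (List Int)
  | 0, _, _, remaining, result, _ => some (result ++ remaining)
  | fuel + 1, pos, k, remaining, result, e =>
    let w := PySem.List.pyGetD fact (n - pos - 1) 0
    match pvQ k w with
    | none => none
    | some q =>
      if (remaining.length : Int) - 1 < q then none
      else
        let k' := k - (q - 1) * w
        let f := e.getD pos 0
        match PySem.List.index? remaining f with
        | none => none  -- unreachable: f is always present in remaining
        | some idx =>
          let j : Int := if q - 1 < (idx : Int) then q - 1 else q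
          match PySem.List.pop? remaining j with
          | none => none  -- unreachable: 0 ≤ j < len(remaining) here
          | some (v, rest) =>
            let t := e.getD v 0
            pvLoopB n fact fuel (pos + 1) k' rest (result ++ [v]) ((e.insert f t).insert t f)

def getKthCycle_alt (n : Int) (k : Int) (fact : List Int) : Option (List Int) :=
  pvLoopB n fact (n - 2).toNat 2 k (PySem.List.pyRange 1 n 1) [n] (pvEInit n)

-- ===== PRECONDITION & SPEC =====
-- Exactly where Python A returns: n ≤ 0 raises KeyError in union(1, n); for n ≥ 3 the
-- first iteration always evaluates fact[n-3], an IndexError when len(fact) < n - 2.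
def Pre_getKthCycle (n : Int) (k : Int) (fact : List Int) : Prop :=
  1 ≤ n ∧ (n ≤ 2 ∨ n - 2 ≤ (fact.length : Int))
instance (n : Int) (k : Int) (fact : List Int) : Decidable (Pre_getKthCycle n k fact) := by
  unfold Pre_getKthCycle; infer_instance

def pvWitness_getKthCycle : Int × Int × List Int := (4, 2, [1, 2, 6])

def Spec_getKthCycle (n : Int) (k : Int) (fact : List Int) (out : Option (List Int)) : Prop :=
  out = getKthCycle_alt n k fact
instance (n : Int) (k : Int) (fact : List Int) (out : Option (List Int)) :
    Decidable (Spec_getKthCycle n k fact out) := by unfold Spec_getKthCycle; infer_instance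

-- ===== CLAIM (what is proved, stated in full; the proofs are below) =====
def Claim_equal_getKthCycle : Prop := ∀ (n : Int) (k : Int) (fact : List Int),
  Dom_getKthCycle n k fact → Pre_getKthCycle n k fact →
  Spec_getKthCycle n k fact (getKthCycle n k fact)

-- ===== LEMMAS AND PROOFS =====

-- fold of constant-valued inserts
theorem getD_foldl_insert_const {ν : Type} (w dflt : ν) :
    ∀ (l : List Int) (d : PySem.Dict Int ν) (j : Int),
      (l.foldl (fun d e => d.insert e w) d).getD j dflt
        = if j ∈ l then w else d.getD j dflt := by
  intro l
  induction l with
  | nil => intro d j; simp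
  | cons a l ih =>
    intro d j
    simp only [List.foldl_cons, ih, PySem.Dict.getD_insert, List.mem_cons]
    by_cases hj : j ∈ l <;> by_cases hja : j = a <;> simp [hj, hja]

-- fold of key-dependent inserts over distinct keys
theorem getD_foldl_insert_fn {ν : Type} (g : Int → ν) (dflt : ν) :
    ∀ (l : List Int), l.Nodup → ∀ (d : PySem.Dict Int ν) (j : Int),
      (l.foldl (fun d i => d.insert i (g i)) d).getD j dflt
        = if j ∈ l then g j else d.getD j dflt := by
  intro l
  induction l with
  | nil => intro _ d j; simp
  | cons a l ih =>
    intro hnd d j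
    simp only [List.nodup_cons] at hnd
    simp only [List.foldl_cons, ih hnd.2, PySem.Dict.getD_insert, List.mem_cons]
    by_cases hj : j ∈ l <;> by_cases hja : j = a
    · exact absurd (hja ▸ hj) hnd.1
    · simp [hj, hja]
    · simp [hj, hja]
    · simp [hj, hja]

-- A's component map is well-formed on 1..n
def CompWF (n : Int) (d : PySem.Dict Int (List Int)) : Prop :=
  ∀ x, 1 ≤ x → x ≤ n →
    x ∈ d.getD x [] ∧ ∀ y ∈ d.getD x [], 1 ≤ y ∧ y ≤ n ∧ d.getD y [] = d.getD x []

-- the chain invariant tying A's DSU to B's endpoint-pairing map: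
-- sinks are exactly pos..n, sources exactly the remaining values, e pairs them,
-- and the only remaining value in a sink's component is its paired source.
def ChainInv (n pos : Int) (R : List Int) (d : PySem.Dict Int (List Int))
    (e : PySem.Dict Int Int) : Prop :=
  (∀ p, pos ≤ p → p ≤ n → e.getD p 0 ∈ R ∧ e.getD (e.getD p 0) 0 = p) ∧
  (∀ v ∈ R, (pos ≤ e.getD v 0 ∧ e.getD v 0 ≤ n) ∧ e.getD (e.getD v 0) 0 = v) ∧
  (∀ p, pos ≤ p → p ≤ n → ∀ v ∈ R, (v ∈ d.getD p [] ↔ v = e.getD p 0)) ∧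
  (∀ p q, pos ≤ p → p ≤ n → pos ≤ q → q ≤ n → (q ∈ d.getD p [] ↔ q = p))

-- membership in eraseIdx of a Nodup list
theorem mem_eraseIdx_nodup (R : List Int) (j : Nat) (hj : j < R.length) (hnd : R.Nodup) :
    ∀ x : Int, x ∈ R.eraseIdx j ↔ x ∈ R ∧ x ≠ R[j] := by
  intro x
  rw [List.mem_eraseIdx_iff_getElem]
  constructor
  · rintro ⟨i, hi, hij, rfl⟩
    refine ⟨List.getElem_mem hi, fun hcontra => hij ?_⟩
    exact (List.Nodup.getElem_inj_iff hnd).1 hcontra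
  · rintro ⟨hx, hne⟩
    obtain ⟨i, hi, rfl⟩ := List.getElem_of_mem hx
    exact ⟨i, hi, fun hij => hne (by subst hij; rfl), rfl⟩

theorem compWF_union (n a b : Int) (d : PySem.Dict Int (List Int))
    (hWF : CompWF n d) (ha1 : 1 ≤ a) (ha2 : a ≤ n) (hb1 : 1 ≤ b) (hb2 : b ≤ n) :
    CompWF n (pvDsuUnion d a b) := by
  intro x hx1 hx2
  have hd' : ∀ z : Int, (pvDsuUnion d a b).getD z []
      = if z ∈ d.getD a [] ++ d.getD b [] then d.getD a [] ++ d.getD b [] else d.getD z [] := by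
    intro z
    unfold pvDsuUnion
    rw [getD_foldl_insert_const]
  by_cases hx : x ∈ d.getD a [] ++ d.getD b []
  · rw [hd' x, if_pos hx]
    refine ⟨hx, fun y hy => ?_⟩
    have hyb : 1 ≤ y ∧ y ≤ n := by
      rcases List.mem_append.1 hy with h | h
      · exact ⟨((hWF a ha1 ha2).2 y h).1, ((hWF a ha1 ha2).2 y h).2.1⟩
      · exact ⟨((hWF b hb1 hb2).2 y h).1, ((hWF b hb1 hb2).2 y h).2.1⟩
    exact ⟨hyb.1, hyb.2, by rw [hd' y, if_pos hy]⟩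
  · rw [hd' x, if_neg hx]
    refine ⟨(hWF x hx1 hx2).1, fun y hy => ?_⟩
    obtain ⟨hy1, hy2, hyeq⟩ := (hWF x hx1 hx2).2 y hy
    have hynl : y ∉ d.getD a [] ++ d.getD b [] := by
      intro hmem
      rcases List.mem_append.1 hmem with h | h
      · exact hx (List.mem_append.2 (Or.inl (by
          rw [← ((hWF a ha1 ha2).2 y h).2.2, hyeq]; exact (hWF x hx1 hx2).1)))
      · exact hx (List.mem_append.2 (Or.inr (by
          rw [← ((hWF b hb1 hb2).2 y h).2.2, hyeq]; exact (hWF x hx1 hx2).1)))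
    exact ⟨hy1, hy2, by rw [hd' y, if_neg hynl, hyeq]⟩

-- one step of the loops preserves everything
theorem inv_step (n pos : Int) (R : List Int) (d : PySem.Dict Int (List Int))
    (e : PySem.Dict Int Int) (j : Nat) (hj : j < R.length)
    (h2pos : 2 ≤ pos) (hposn : pos < n)
    (hWF : CompWF n d) (hInv : ChainInv n pos R d e)
    (hnd : R.Nodup) (hbnd : ∀ v ∈ R, 1 ≤ v ∧ v ≤ n)
    (hne : R[j] ≠ e.getD pos 0) :
    CompWF n (pvDsuUnion d pos R[j]) ∧
    ChainInv n (pos + 1) (R.eraseIdx j) (pvDsuUnion d pos R[j])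
      ((e.insert (e.getD pos 0) (e.getD R[j] 0)).insert (e.getD R[j] 0) (e.getD pos 0)) ∧
    (R.eraseIdx j).Nodup ∧ (∀ v ∈ R.eraseIdx j, 1 ≤ v ∧ v ≤ n) := by
  set f := e.getD pos 0 with hf
  set t := e.getD R[j] 0 with ht
  have hvR : R[j] ∈ R := List.getElem_mem hj
  obtain ⟨hv1, hv2⟩ := hbnd _ hvR
  obtain ⟨h1, h2, h3, h4⟩ := hInv
  have hposn' : pos ≤ n := le_of_lt hposn
  obtain ⟨hfR, hef⟩ := h1 pos le_rfl hposn'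
  rw [← hf] at hfR hef
  obtain ⟨hf1, hf2⟩ := hbnd f hfR
  obtain ⟨⟨ht1, ht2⟩, het⟩ := h2 R[j] hvR
  rw [← ht] at ht1 ht2 het
  have htv : t ≠ pos := by
    intro h
    have h' := het
    rw [h] at h'
    exact hne h'.symm
  have htpos : pos < t := lt_of_le_of_ne ht1 (Ne.symm htv)
  have hfle : f ≤ pos := by
    by_contra hcon
    push_neg at hcon
    have hfc : f ∈ d.getD pos [] := (h3 pos le_rfl hposn' f hfR).2 rfl
    have := (h4 pos f le_rfl hposn' (by omega) hf2).1 hfc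
    omega
  have hWFt := hWF t (by omega) ht2
  have htt : t ∈ d.getD t [] := hWFt.1
  have hvt : R[j] ∈ d.getD t [] := (h3 t ht1 ht2 R[j] hvR).2 het.symm
  have hcompvt : d.getD R[j] [] = d.getD t [] := (hWFt.2 R[j] hvt).2.2
  have htinR : t ∈ R → t = R[j] := fun hmem => ((h3 t ht1 ht2 t hmem).1 htt).trans het
  set nl := d.getD pos [] ++ d.getD R[j] [] with hnl
  have hd' : ∀ z : Int, (pvDsuUnion d pos R[j]).getD z [] = if z ∈ nl then nl else d.getD z [] := by
    intro z
    unfold pvDsuUnion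
    rw [getD_foldl_insert_const]
  have hmemnl : ∀ x : Int, x ∈ nl ↔ x ∈ d.getD pos [] ∨ x ∈ d.getD t [] := by
    intro x
    rw [hnl, List.mem_append, hcompvt]
  have he' : ∀ z : Int, ((e.insert f t).insert t f).getD z 0
      = if z = t then f else if z = f then t else e.getD z 0 := by
    intro z
    rw [PySem.Dict.getD_insert, PySem.Dict.getD_insert]
  have hmemR' := mem_eraseIdx_nodup R j hj hnd
  have hsink : ∀ p, pos ≤ p → p ≤ n → (p ∈ nl ↔ p = pos ∨ p = t) := by
    intro p hp1 hp2
    rw [hmemnl]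
    constructor
    · rintro (h | h)
      · exact Or.inl ((h4 pos p le_rfl hposn' hp1 hp2).1 h)
      · exact Or.inr ((h4 t p ht1 ht2 hp1 hp2).1 h)
    · rintro (rfl | rfl)
      · exact Or.inl (hWF p (by omega) hposn').1
      · exact Or.inr htt
  refine ⟨compWF_union n pos R[j] d hWF (by omega) hposn' hv1 hv2, ⟨?_, ?_, ?_, ?_⟩,
    List.Nodup.eraseIdx j hnd, fun x hx => hbnd x ((hmemR' x).1 hx).1⟩
  · -- h1'
    intro p hp1 hp2
    rw [he' p]
    by_cases hpt : p = t
    · rw [if_pos hpt]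
      refine ⟨(hmemR' f).2 ⟨hfR, fun h => hne h.symm⟩, ?_⟩
      rw [he' f, if_neg (by omega), if_pos rfl]
      exact hpt.symm
    · rw [if_neg hpt, if_neg (by omega : p ≠ f)]
      obtain ⟨hepR, hee⟩ := h1 p (by omega) hp2
      have hept : e.getD p 0 ≠ t := by
        intro h
        have h' := hee
        rw [h, het] at h'
        have := htinR (h ▸ hepR)
        exact hpt (by omega)
      have hepv : e.getD p 0 ≠ R[j] := by
        intro h
        have h' := hee
        rw [h, ← ht] at h'
        exact hpt h'.symm
      have hepf : e.getD p 0 ≠ f := by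
        intro h
        have h' := hee
        rw [h, hef] at h'
        omega
      refine ⟨(hmemR' _).2 ⟨hepR, hepv⟩, ?_⟩
      rw [he' _, if_neg hept, if_neg hepf, hee]
  · -- h2'
    intro x hx
    obtain ⟨hxR, hxv⟩ := (hmemR' x).1 hx
    rw [he' x]
    by_cases hxf : x = f
    · rw [if_neg (by omega : x ≠ t), if_pos hxf]
      refine ⟨⟨by omega, ht2⟩, ?_⟩
      rw [he' t, if_pos rfl]
      exact hxf.symm
    · have hxt : x ≠ t := by
        intro h
        exact hxv (h.trans (htinR (h ▸ hxR)))
      rw [if_neg hxt, if_neg hxf]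
      obtain ⟨⟨hex1, hex2⟩, hexx⟩ := h2 x hxR
      have hexpos : e.getD x 0 ≠ pos := by
        intro h
        have h' := hexx
        rw [h, ← hf] at h'
        exact hxf h'.symm
      have hext : e.getD x 0 ≠ t := by
        intro h
        have h' := hexx
        rw [h, het] at h'
        exact hxv h'.symm
      have hexf : e.getD x 0 ≠ f := by
        intro h
        have h' := hexx
        rw [h, hef] at h'
        have hxpos : x ∈ d.getD pos [] := h' ▸ (hWF pos (by omega) hposn').1
        exact hxf ((h3 pos le_rfl hposn' x hxR).1 hxpos)
      refine ⟨⟨by omega, hex2⟩, ?_⟩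
      rw [he' _, if_neg hext, if_neg hexf, hexx]
  · -- h3'
    intro p hp1 hp2 x hx
    obtain ⟨hxR, hxv⟩ := (hmemR' x).1 hx
    rw [hd' p, he' p]
    by_cases hpt : p = t
    · rw [if_pos (by rw [hpt, hmemnl]; exact Or.inr htt), if_pos hpt]
      constructor
      · intro hxnl
        rcases (hmemnl x).1 hxnl with hc | hc
        · exact (h3 pos le_rfl hposn' x hxR).1 hc
        · exact absurd (((h3 t ht1 ht2 x hxR).1 hc).trans het) hxv
      · intro hxf
        rw [hmemnl]
        exact Or.inl ((h3 pos le_rfl hposn' x hxR).2 hxf)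
    · have hpnl : p ∉ nl := by
        intro h
        rcases (hsink p (by omega) hp2).1 h with h' | h'
        · omega
        · exact hpt h'
      rw [if_neg hpnl, if_neg hpt, if_neg (by omega : p ≠ f)]
      exact h3 p (by omega) hp2 x hxR
  · -- h4'
    intro p q hp1 hp2 hq1 hq2
    rw [hd' p]
    by_cases hpt : p = t
    · rw [if_pos (by rw [hpt, hmemnl]; exact Or.inr htt)]
      constructor
      · intro hqnl
        rcases (hsink q (by omega) hq2).1 hqnl with h' | h'
        · omega
        · rw [h', hpt]
      · intro h
        rw [h, hpt, hmemnl]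
        exact Or.inr htt
    · have hpnl : p ∉ nl := by
        intro h
        rcases (hsink p (by omega) hp2).1 h with h' | h'
        · omega
        · exact hpt h'
      rw [if_neg hpnl]
      exact h4 p q (by omega) hp2 (by omega) hq2

-- the subtraction scan over the remaining values, skipping the one forbidden value f
def pvScanL (f w : Int) : List Int → Int → Option (Int × Int)
  | [], _ => none
  | r :: rest, k =>
    if r = f then (pvScanL f w rest k).map (fun p => (p.1 + 1, p.2))
    else if k ≤ w then some (0, k)
    else (pvScanL f w rest (k - w)).map (fun p => (p.1 + 1, p.2))

theorem pvQ_ge_one (k w q : Int) (h : pvQ k w = some q) : 1 ≤ q := by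
  unfold pvQ at h
  split_ifs at h with hk hw
  · simp at h; omega
  · obtain ⟨hlo, hhi⟩ :=
      (PySem.Int.neg_floordiv_neg_eq_iff_of_pos (a := k) hw).1 (Option.some.inj h)
    by_contra hq1
    have hqw : q * w ≤ 0 := mul_nonpos_of_nonpos_of_nonneg (by omega) (by omega)
    omega

theorem pvQ_step (k w : Int) (h1 : ¬ k ≤ w) (h2 : 0 < w) :
    pvQ k w = (pvQ (k - w) w).map (· + 1) := by
  unfold pvQ
  rw [if_neg h1, if_pos h2]
  by_cases hk2 : k - w ≤ w
  · rw [if_pos hk2]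
    simp only [Option.map_some]
    congr 1
    exact (PySem.Int.neg_floordiv_neg_eq_iff_of_pos h2).2 ⟨by omega, by omega⟩
  · rw [if_neg hk2, if_pos h2]
    simp only [Option.map_some]
    congr 1
    obtain ⟨hlo, hhi⟩ :=
      (PySem.Int.neg_floordiv_neg_eq_iff_of_pos (a := k - w) h2).1 rfl
    refine (PySem.Int.neg_floordiv_neg_eq_iff_of_pos h2).2 ⟨?_, ?_⟩
    · have : (-PySem.Int.floordiv (-(k - w)) w - 1) * w
          = -PySem.Int.floordiv (-(k - w)) w * w - w := by ring
      rw [this] at hlo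
      have : (-PySem.Int.floordiv (-(k - w)) w + 1 - 1) * w
          = -PySem.Int.floordiv (-(k - w)) w * w := by ring
      rw [this]
      omega
    · have : (-PySem.Int.floordiv (-(k - w)) w + 1) * w
          = -PySem.Int.floordiv (-(k - w)) w * w + w := by ring
      rw [this]
      omega

theorem pvQ_none_step (k w : Int) (h1 : ¬ k ≤ w) (h2 : ¬ 0 < w) :
    pvQ (k - w) w = none := by
  unfold pvQ
  rw [if_neg (by omega), if_neg h2]

-- scan with no forbidden value present
theorem scanL_nf (w f : Int) :
    ∀ (R : List Int), f ∉ R → ∀ k : Int,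
      pvScanL f w R k = match pvQ k w with
        | none => none
        | some q => if q ≤ (R.length : Int) then some (q - 1, k - (q - 1) * w) else none := by
  intro R
  induction R with
  | nil =>
    intro _ k
    cases hq : pvQ k w with
    | none => simp [pvScanL]
    | some q =>
      have := pvQ_ge_one k w q hq
      simp only [pvScanL, List.length_nil, Nat.cast_zero]
      rw [if_neg (by omega)]
  | cons r rest ih =>
    intro hf k
    have hrf : r ≠ f := fun h => hf (h ▸ List.mem_cons_self)
    have hfrest : f ∉ rest := fun h => hf (List.mem_cons_of_mem r h)
    by_cases hk : k ≤ w
    · have hq : pvQ k w = some 1 := by simp [pvQ, hk]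
      simp only [pvScanL, if_neg hrf, if_pos hk, hq, List.length_cons]
      rw [if_pos (by push_cast; omega)]
      norm_num
    · by_cases hw : 0 < w
      · rw [pvQ_step k w hk hw]
        cases hq' : pvQ (k - w) w with
        | none => unfold pvQ at hq'; split_ifs at hq' <;> simp at hq' 
        | some q' =>
          have hq'1 := pvQ_ge_one _ _ _ hq'
          simp only [pvScanL, if_neg hrf, if_neg hk, ih hfrest (k - w), hq',
            Option.map_some, List.length_cons]
          by_cases hlen : q' ≤ (rest.length : Int)
          · rw [if_pos hlen, if_pos (by push_cast; omega)]
            simp only [Option.map_some, Option.some.injEq, Prod.mk.injEq]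
            constructor <;> ring
          · rw [if_neg hlen, if_neg (by push_cast; omega)]
            rfl
      · have hq : pvQ k w = none := by simp [pvQ, hk, hw]
        simp only [pvScanL, if_neg hrf, if_neg hk, ih hfrest (k - w),
          pvQ_none_step k w hk hw, hq]
        rfl

-- scan with the forbidden value present exactly once, closed form
theorem scanL_spec (w f : Int) :
    ∀ (R : List Int), R.Nodup → ∀ (idx : Nat), PySem.List.index? R f = some idx →
      ∀ k : Int,
      pvScanL f w R k = match pvQ k w with
        | none => none
        | some q =>
          if q ≤ (R.length : Int) - 1
          then some ((if q - 1 < (idx : Int) then q - 1 else q), k - (q - 1) * w)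
          else none := by
  intro R
  induction R with
  | nil => intro _ idx hidx _; simp [PySem.List.index?_eq_idxOf?, List.idxOf?] at hidx
  | cons r rest ih =>
    intro hnd idx hidx k
    by_cases hrf : r = f
    · subst hrf
      rw [PySem.List.index?_cons_self] at hidx
      have hidx0 : idx = 0 := (Option.some.inj hidx).symm
      subst hidx0
      have hfrest : r ∉ rest := (List.nodup_cons.1 hnd).1
      have hstep : pvScanL r w (r :: rest) k
          = (pvScanL r w rest k).map (fun p => (p.1 + 1, p.2)) := by
        simp [pvScanL]
      cases hq : pvQ k w with
      | none =>
        rw [hstep, scanL_nf w r rest hfrest k]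
        simp only [hq]
        rfl
      | some q =>
        have hq1 := pvQ_ge_one _ _ _ hq
        rw [hstep, scanL_nf w r rest hfrest k]
        simp only [hq, List.length_cons]
        by_cases hlen : q ≤ (rest.length : Int)
        · rw [if_pos hlen,
            if_pos (show q ≤ ((rest.length + 1 : Nat) : Int) - 1 by push_cast; omega),
            if_neg (show ¬(q - 1 < ((0 : Nat) : Int)) by push_cast; omega)]
          simp only [Option.map_some, Option.some.injEq, Prod.mk.injEq]
          exact ⟨by omega, trivial⟩
        · rw [if_neg hlen,
            if_neg (show ¬(q ≤ ((rest.length + 1 : Nat) : Int) - 1) by push_cast; omega)]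
          rfl
    · rw [PySem.List.index?_cons_of_ne rest hrf] at hidx
      obtain ⟨idx', hidx', rfl⟩ : ∃ idx', PySem.List.index? rest f = some idx' ∧ idx = idx' + 1 := by
        cases h : PySem.List.index? rest f with
        | none => rw [h] at hidx; simp at hidx
        | some i => rw [h] at hidx; exact ⟨i, rfl, by simpa using hidx.symm⟩
      obtain ⟨hidxlt, -, -⟩ := PySem.List.getElem_of_index?_eq_some hidx'
      by_cases hk : k ≤ w
      · have hq : pvQ k w = some 1 := by simp [pvQ, hk]
        simp only [pvScanL, if_neg hrf, if_pos hk, hq, List.length_cons]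
        rw [if_pos (by push_cast; omega), if_pos (by push_cast; omega)]
        norm_num
      · by_cases hw : 0 < w
        · rw [pvQ_step k w hk hw]
          cases hq' : pvQ (k - w) w with
          | none => unfold pvQ at hq'; split_ifs at hq' <;> simp at hq' 
          | some q' =>
            have hq'1 := pvQ_ge_one _ _ _ hq'
            simp only [pvScanL, if_neg hrf, if_neg hk,
              ih hnd.of_cons idx' hidx' (k - w), hq', Option.map_some, List.length_cons]
            by_cases hlen : q' ≤ (rest.length : Int) - 1
            · rw [if_pos hlen,
                if_pos (show q' + 1 ≤ ((rest.length + 1 : Nat) : Int) - 1 by push_cast; omega)]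
              simp only [Option.map_some, Option.some.injEq, Prod.mk.injEq]
              constructor
              · by_cases hcmp : q' - 1 < (idx' : Int)
                · rw [if_pos hcmp,
                    if_pos (show q' + 1 - 1 < ((idx' + 1 : Nat) : Int) by push_cast at hcmp ⊢; omega)]
                  omega
                · rw [if_neg hcmp,
                    if_neg (show ¬(q' + 1 - 1 < ((idx' + 1 : Nat) : Int)) by push_cast at hcmp ⊢; omega)]
              · ring
            · rw [if_neg hlen,
                if_neg (show ¬(q' + 1 ≤ ((rest.length + 1 : Nat) : Int) - 1) by push_cast; omega)]
              rfl
        · have hq : pvQ k w = none := by simp [pvQ, hk, hw]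
          simp only [pvScanL, if_neg hrf, if_neg hk,
            ih hnd.of_cons idx' hidx' (k - w), pvQ_none_step k w hk hw, hq]
          rfl

-- indexing into -1 :: res ++ avail at Int position res.length + 1 + t
theorem lst_index (res avail : List Int) (t : Int) (ht0 : 0 ≤ t) (ht : t < (avail.length : Int)) :
    PySem.List.pyGetD ((-1 : Int) :: res ++ avail) ((res.length : Int) + 1 + t) 0
      = avail[t.toNat]'(by omega) := by
  have hm : (res.length : Int) + 1 + t = (((res.length + t.toNat + 1 : Nat) : Nat) : Int) := by
    push_cast; omega
  rw [hm, PySem.List.pyGetD_natCast]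
  have hlt : t.toNat < avail.length := by omega
  have hl : ((-1 : Int) :: res ++ avail) = (((-1 : Int) :: res) ++ avail) := rfl
  have h1 : res.length + t.toNat + 1 = ((-1 : Int) :: res).length + t.toNat := by
    simp; omega
  rw [hl, h1, List.getD_eq_getElem?_getD, List.getElem?_append_right (by omega)]
  simp [List.getElem?_eq_getElem, hlt]

-- A's index scan equals the list scan pvScanL
theorem innerA_eq_scanL (n pos numOpen w : Int) (fact res R : List Int)
    (d : PySem.Dict Int (List Int)) (f : Int)
    (hw : PySem.List.pyGetD fact (numOpen - 2) 0 = w)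
    (hres : (res.length : Int) = pos - 1)
    (hss : ∀ v ∈ R, (pvSameSet d pos v = true ↔ v = f)) :
    ∀ (fuel : Nat) (t : Nat) (k : Int), t + fuel = R.length →
      (∀ jj k', pvScanL f w (R.drop t) k = some (jj, k') →
        pvInnerA fact ((-1 : Int) :: res ++ R) d pos numOpen fuel (pos + t) k = (pos + t + jj, k')) ∧
      (pvScanL f w (R.drop t) k = none →
        (pvInnerA fact ((-1 : Int) :: res ++ R) d pos numOpen fuel (pos + t) k).1
          = pos + t + fuel) := by
  intro fuel
  induction fuel with
  | zero =>
    intro t k hlen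
    have hdrop : R.drop t = [] := List.drop_of_length_le (by omega)
    rw [hdrop]
    exact ⟨fun jj k' h => by simp [pvScanL] at h, fun _ => by simp [pvInnerA]⟩
  | succ fuel ih =>
    intro t k hlen
    have htlt : t < R.length := by omega
    have hdrop : R.drop t = R[t] :: R.drop (t + 1) := List.drop_eq_getElem_cons htlt
    have hget : PySem.List.pyGetD ((-1 : Int) :: res ++ R) (pos + (t : Int)) 0 = R[t] := by
      have harg : pos + (t : Int) = (res.length : Int) + 1 + (t : Int) := by omega
      rw [harg, lst_index res R (t : Int) (by omega) (by exact_mod_cast htlt)]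
      congr 1
    have hR : (R[t]'htlt) ∈ R := List.getElem_mem htlt
    rw [hdrop]
    by_cases hf : R[t] = f
    · have hsame : pvSameSet d pos (R[t]'htlt) = true := (hss _ hR).2 hf
      have hunf : pvInnerA fact ((-1 : Int) :: res ++ R) d pos numOpen (fuel + 1) (pos + t) k
          = pvInnerA fact ((-1 : Int) :: res ++ R) d pos numOpen fuel (pos + t + 1) k := by
        simp only [pvInnerA, hget, hsame, if_true]
      have harg : pos + (t : Int) + 1 = pos + ((t + 1 : Nat) : Int) := by push_cast; ring
      obtain ⟨ihs, ihn⟩ := ih (t + 1) k (by omega)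
      constructor
      · intro jj k' hscan
        simp only [pvScanL, if_pos hf] at hscan
        cases hsub : pvScanL f w (R.drop (t + 1)) k with
        | none => rw [hsub] at hscan; simp at hscan
        | some p =>
          rw [hsub] at hscan
          simp only [Option.map_some, Option.some.injEq] at hscan
          rw [hunf, harg, ihs p.1 p.2 (by rw [hsub])]
          simp only [Prod.mk.injEq] at hscan ⊢
          obtain ⟨h1, h2⟩ := hscan
          exact ⟨by push_cast; omega, h2⟩
      · intro hscan
        simp only [pvScanL, if_pos hf] at hscan
        cases hsub : pvScanL f w (R.drop (t + 1)) k with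
        | none =>
          rw [hunf, harg, ihn (by rw [hsub])]
          push_cast; omega
        | some p => rw [hsub] at hscan; simp at hscan
    · have hsame : pvSameSet d pos (R[t]'htlt) = false := by
        rw [← Bool.not_eq_true]
        exact fun h => hf ((hss _ hR).1 h)
      by_cases hk : k ≤ w
      · have hunf : pvInnerA fact ((-1 : Int) :: res ++ R) d pos numOpen (fuel + 1) (pos + t) k
            = (pos + (t : Int), k) := by
          simp only [pvInnerA, hget, hsame, Bool.false_eq_true, if_false, hw, if_pos hk]
        constructor
        · intro jj k' hscan
          simp only [pvScanL, if_neg hf, if_pos hk, Option.some.injEq] at hscan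
          rw [hunf]
          simp only [Prod.mk.injEq] at hscan ⊢
          obtain ⟨h1, h2⟩ := hscan
          exact ⟨by omega, h2⟩
        · intro hscan
          simp only [pvScanL, if_neg hf, if_pos hk] at hscan
          exact absurd hscan (by simp)
      · have hunf : pvInnerA fact ((-1 : Int) :: res ++ R) d pos numOpen (fuel + 1) (pos + t) k
            = pvInnerA fact ((-1 : Int) :: res ++ R) d pos numOpen fuel (pos + t + 1) (k - w) := by
          simp only [pvInnerA, hget, hsame, Bool.false_eq_true, if_false, hw, if_neg hk]
        have harg : pos + (t : Int) + 1 = pos + ((t + 1 : Nat) : Int) := by push_cast; ring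
        obtain ⟨ihs, ihn⟩ := ih (t + 1) (k - w) (by omega)
        constructor
        · intro jj k' hscan
          simp only [pvScanL, if_neg hf, if_neg hk] at hscan
          cases hsub : pvScanL f w (R.drop (t + 1)) (k - w) with
          | none => rw [hsub] at hscan; simp at hscan
          | some p =>
            rw [hsub] at hscan
            simp only [Option.map_some, Option.some.injEq] at hscan
            rw [hunf, harg, ihs p.1 p.2 (by rw [hsub])]
            simp only [Prod.mk.injEq] at hscan ⊢
            obtain ⟨h1, h2⟩ := hscan
            exact ⟨by push_cast; omega, h2⟩
        · intro hscan
          simp only [pvScanL, if_neg hf, if_neg hk] at hscan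
          cases hsub : pvScanL f w (R.drop (t + 1)) (k - w) with
          | none =>
            rw [hunf, harg, ihn (by rw [hsub])]
            push_cast; omega
          | some p => rw [hsub] at hscan; simp at hscan

-- `while j > pos` shift loop moves element t of the tail to its front
theorem shift_spec :
    ∀ (t : Nat) (A B : List Int) (v : Int), t < B.length →
      PySem.List.pySetD (pvShiftA (A ++ B) ((A.length : Int) + t) t) (A.length : Int) v
        = A ++ v :: (B.take t ++ B.drop (t + 1)) := by
  intro t
  induction t with
  | zero =>
    intro A B v hB
    simp only [Nat.cast_zero, add_zero, pvShiftA]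
    have : ((A.length : Int)) = ((A.length : Nat) : Int) := rfl
    rw [PySem.List.pySetD_natCast]
    rw [List.set_append_right _ _ (Nat.le_refl _)]
    simp only [Nat.sub_self]
    obtain ⟨b, B', rfl⟩ : ∃ b B', B = b :: B' := by
      cases B with
      | nil => simp at hB
      | cons b B' => exact ⟨b, B', rfl⟩
    simp
  | succ t ih =>
    intro A B v hB
    simp only [pvShiftA]
    have hx : PySem.List.pyGetD (A ++ B) ((A.length : Int) + (t + 1 : Nat) - 1) 0
        = B[t]'(by omega) := by
      have he : (A.length : Int) + (t + 1 : Nat) - 1 = ((A.length + t : Nat) : Int) := by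
        push_cast; omega
      rw [he, PySem.List.pyGetD_natCast, List.getD_eq_getElem?_getD,
          List.getElem?_append_right (by omega)]
      simp [List.getElem?_eq_getElem, Nat.lt_of_succ_lt hB, Nat.add_sub_cancel_left,
        show A.length + t - A.length = t by omega]
    have hset : PySem.List.pySetD (A ++ B) ((A.length : Int) + (t + 1 : Nat)) (B[t]'(by omega))
        = A ++ B.set (t + 1) (B[t]'(by omega)) := by
      have he : (A.length : Int) + (t + 1 : Nat) = ((A.length + (t + 1) : Nat) : Int) := by
        push_cast; ring
      rw [he, PySem.List.pySetD_natCast, List.set_append_right _ _ (by omega),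
        Nat.add_sub_cancel_left]
    rw [hx, hset]
    set x := B[t]'(by omega) with hxdef
    set B' := B.set (t + 1) x with hB'
    have hB'len : B'.length = B.length := by simp [hB']
    have harg : (A.length : Int) + (t + 1 : Nat) - 1 = (A.length : Int) + (t : Nat) := by
      push_cast; ring
    rw [harg, ih A B' v (by rw [hB'len]; omega)]
    have hBdecomp : B' = B.take (t + 1) ++ x :: B.drop (t + 2) := by
      rw [hB']
      rw [List.set_eq_take_append_cons_drop, if_pos (by omega)]
    have h1 : B'.take t = B.take t := by
      rw [hB', List.take_set]
      exact List.set_eq_of_length_le (by simp [List.length_take])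
    have h2 : B'.drop (t + 1) = x :: B.drop (t + 2) := by
      have hlen : (B.take (t + 1)).length = t + 1 := by
        simp [List.length_take]; omega
      have hd := List.drop_left (l₁ := B.take (t + 1)) (l₂ := x :: B.drop (t + 2))
      rw [hlen] at hd
      rw [hBdecomp]
      exact hd
    have h3 : B.take (t + 1) = B.take t ++ [x] := by
      rw [List.take_succ]
      simp [List.getElem?_eq_getElem (by omega : t < B.length), hxdef]
    rw [h1, h2, h3]
    simp

-- the two outer loops agree
theorem outer_eq (n : Int) (fact : List Int) :
    ∀ (fuel : Nat) (pos : Int) (res R : List Int)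
      (d : PySem.Dict Int (List Int)) (e : PySem.Dict Int Int) (numOpen k : Int),
      2 ≤ pos → (fuel : Int) = n - pos →
      (res.length : Int) = pos - 1 → (R.length : Int) = n + 1 - pos →
      numOpen = n - pos + 1 →
      CompWF n d → ChainInv n pos R d e → R.Nodup → (∀ v ∈ R, 1 ≤ v ∧ v ≤ n) →
      pvOuterA n fact fuel pos ((-1 : Int) :: res ++ R) d numOpen k
        = pvLoopB n fact fuel pos k R res e := by
  intro fuel
  induction fuel with
  | zero =>
    intro pos res R d e numOpen k _ _ _ _ _ _ _ _ _
    simp [pvOuterA, pvLoopB, PySem.List.slice_from_one]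
  | succ fuel ih =>
    intro pos res R d e numOpen k h2p hfuel hres hlenR hnO hWF hInv hnd hbnd
    have hposlt : pos < n := by omega
    have hfa : (n + 1 - pos).toNat = R.length := by omega
    have hfR : e.getD pos 0 ∈ R := (hInv.1 pos le_rfl (by omega)).1
    obtain ⟨idx, hidx⟩ := Option.isSome_iff_exists.1
      ((PySem.List.index?_isSome_iff R (e.getD pos 0)).2 hfR)
    obtain ⟨hidxlt, hidxval, -⟩ := PySem.List.getElem_of_index?_eq_some hidx
    set w := PySem.List.pyGetD fact (n - pos - 1) 0 with hwdef
    have hss : ∀ v ∈ R, (pvSameSet d pos v = true ↔ v = e.getD pos 0) := by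
      intro v hv
      unfold pvSameSet
      rw [List.contains_iff_mem]
      exact hInv.2.2.1 pos le_rfl (by omega) v hv
    have hscan := scanL_spec w (e.getD pos 0) R hnd idx hidx k
    have hinner := innerA_eq_scanL n pos numOpen w fact res R d (e.getD pos 0)
      (by rw [show numOpen - 2 = n - pos - 1 by omega]) hres hss
      R.length 0 k (by omega)
    simp only [List.drop_zero, Nat.cast_zero, add_zero] at hinner
    cases hq : pvQ k w with
    | none =>
      rw [hq] at hscan
      have hi1 := hinner.2 hscan
      simp only [pvOuterA, hfa]
      rcases hInnerEval : pvInnerA fact ((-1 : Int) :: res ++ R) d pos numOpen R.length pos k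
        with ⟨i, k2⟩
      rw [hInnerEval] at hi1
      have hi1' : i = pos + (R.length : Int) := hi1
      rw [if_pos (show i = n + 1 by omega)]
      simp only [pvLoopB, ← hwdef, hq]
    | some q =>
      have hq1 := pvQ_ge_one k w q hq
      rw [hq] at hscan
      by_cases hbig : (R.length : Int) - 1 < q
      · have hscan' : pvScanL (e.getD pos 0) w R k = none := by
          rw [hscan]
          exact if_neg (by omega)
        have hi1 := hinner.2 hscan'
        simp only [pvOuterA, hfa]
        rcases hInnerEval : pvInnerA fact ((-1 : Int) :: res ++ R) d pos numOpen R.length pos k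
          with ⟨i, k2⟩
        rw [hInnerEval] at hi1
        have hi1' : i = pos + (R.length : Int) := hi1
        rw [if_pos (show i = n + 1 by omega)]
        simp only [pvLoopB, ← hwdef, hq]
        rw [if_pos hbig]
      · have hscan' : pvScanL (e.getD pos 0) w R k
            = some ((if q - 1 < (idx : Int) then q - 1 else q), k - (q - 1) * w) := by
          rw [hscan]
          exact if_pos (by omega)
        set jv : Int := if q - 1 < (idx : Int) then q - 1 else q with hjdef
        have hj0 : 0 ≤ jv := by rw [hjdef]; split_ifs <;> omega
        have hjlt : jv < (R.length : Int) := by rw [hjdef]; split_ifs <;> omega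
        have hjne : jv ≠ (idx : Int) := by rw [hjdef]; split_ifs <;> omega
        have hjtoNat : jv.toNat < R.length := by omega
        have hi := hinner.1 jv (k - (q - 1) * w) (by rw [hscan', hjdef])
        simp only [pvOuterA, hfa, hi]
        rw [if_neg (show ¬(pos + jv = n + 1) by omega)]
        have htget : PySem.List.pyGetD ((-1 : Int) :: res ++ R) (pos + jv) 0
            = R[jv.toNat]'hjtoNat := by
          rw [show pos + jv = (res.length : Int) + 1 + jv by omega]
          exact lst_index res R jv hj0 hjlt
        rw [htget]
        set temp := R[jv.toNat]'hjtoNat with htemp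
        have hshift : PySem.List.pySetD
            (pvShiftA ((-1 : Int) :: res ++ R) (pos + jv) (pos + jv - pos).toNat) pos temp
            = (-1 : Int) :: (res ++ [temp]) ++ (R.eraseIdx jv.toNat) := by
          have hAlen : ((((-1 : Int) :: res).length : Nat) : Int) = pos := by
            simp; omega
          have harg1 : pos + jv
              = ((((-1 : Int) :: res).length : Nat) : Int) + (jv.toNat : Nat) := by
            rw [hAlen]; omega
          have harg2 : (pos + jv - pos).toNat = jv.toNat := by omega
          rw [harg2, harg1, ← hAlen]
          rw [show ((-1 : Int) :: res ++ R) = (((-1 : Int) :: res) ++ R) from rfl]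
          rw [shift_spec jv.toNat ((-1 : Int) :: res) R temp hjtoNat]
          rw [List.eraseIdx_eq_take_drop_succ]
          simp
        rw [hshift]
        have hpop : PySem.List.pop? R jv = some (temp, R.eraseIdx jv.toNat) := by
          have hh := PySem.List.pop?_natCast R jv.toNat hjtoNat
          rw [show ((jv.toNat : Nat) : Int) = jv by omega] at hh
          rw [hh, htemp]
        simp only [pvLoopB, ← hwdef, hq]
        rw [if_neg (by omega)]
        simp only [hidx, ← hjdef, hpop]
        have hne' : temp ≠ e.getD pos 0 := by
          rw [htemp, ← hidxval]
          intro hcontra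
          have := (List.Nodup.getElem_inj_iff hnd).1 hcontra
          omega
        obtain ⟨hWF', hInv', hnd', hbnd'⟩ :=
          inv_step n pos R d e jv.toNat hjtoNat h2p hposlt hWF hInv hnd hbnd
            (by rw [← htemp]; exact hne')
        exact ih (pos + 1) (res ++ [temp]) (R.eraseIdx jv.toNat)
          (pvDsuUnion d pos temp)
          ((e.insert (e.getD pos 0) (e.getD temp 0)).insert (e.getD temp 0) (e.getD pos 0))
          (numOpen - 1) (k - (q - 1) * w)
          (by omega) (by omega) (by simp; omega)
          (by rw [List.length_eraseIdx_of_lt hjtoNat]; push_cast; omega)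
          (by omega) hWF' hInv' hnd' hbnd' 

-- initial state: the invariant after union(1, n), lst[1] = n
theorem inv_init (n : Int) (hn : 2 ≤ n) :
    CompWF n (pvDsuUnion (pvDsuInit n) 1 n) ∧
    ChainInv n 2 (PySem.List.pyRange 1 n 1) (pvDsuUnion (pvDsuInit n) 1 n) (pvEInit n) := by
  have hinit : ∀ x : Int, (pvDsuInit n).getD x [] = if 1 ≤ x ∧ x ≤ n then [x] else [] := by
    intro x
    unfold pvDsuInit
    rw [getD_foldl_insert_fn (fun i => [i]) [] _ (PySem.List.nodup_pyRange_one 1 (n + 1))]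
    simp only [PySem.List.mem_pyRange_one]
    split_ifs with h1 h2 <;> first | rfl | omega | simp
  have hWFinit : CompWF n (pvDsuInit n) := by
    intro x hx1 hx2
    rw [hinit x, if_pos ⟨hx1, hx2⟩]
    refine ⟨List.mem_singleton_self x, fun y hy => ?_⟩
    rw [List.mem_singleton] at hy
    subst hy
    exact ⟨hx1, hx2, by rw [hinit y, if_pos ⟨hx1, hx2⟩]⟩
  have hdu : ∀ x : Int, (pvDsuUnion (pvDsuInit n) 1 n).getD x []
      = if x = 1 ∨ x = n then [1, n] else (pvDsuInit n).getD x [] := by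
    intro x
    show (((pvDsuInit n).getD 1 [] ++ (pvDsuInit n).getD n []).foldl
        (fun d e => d.insert e ((pvDsuInit n).getD 1 [] ++ (pvDsuInit n).getD n []))
        (pvDsuInit n)).getD x [] = _
    rw [getD_foldl_insert_const, hinit 1, hinit n,
      if_pos (show (1 : Int) ≤ 1 ∧ (1 : Int) ≤ n by omega),
      if_pos (show (1 : Int) ≤ n ∧ n ≤ n by omega)]
    simp only [List.singleton_append, List.mem_cons, List.mem_singleton,
      List.not_mem_nil, or_false]
  have he : ∀ x : Int, (pvEInit n).getD x 0
      = if x = n then 1 else if x = 1 then n else if 1 ≤ x ∧ x ≤ n then x else 0 := by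
    intro x
    unfold pvEInit
    rw [PySem.Dict.getD_insert, PySem.Dict.getD_insert,
      getD_foldl_insert_fn (fun i => i) 0 _ (PySem.List.nodup_pyRange_one 1 (n + 1))]
    simp only [PySem.List.mem_pyRange_one]
    split_ifs <;> first | rfl | omega | simp
  have hmemR : ∀ v : Int, v ∈ PySem.List.pyRange 1 n 1 ↔ 1 ≤ v ∧ v < n :=
    fun v => PySem.List.mem_pyRange_one
  constructor
  · exact compWF_union n 1 n (pvDsuInit n) hWFinit le_rfl (by omega) (by omega) le_rfl
  · refine ⟨?_, ?_, ?_, ?_⟩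
    · intro p hp1 hp2
      by_cases hpn : p = n
      · rw [he p, if_pos hpn, he 1, if_neg (by omega), if_pos rfl]
        exact ⟨(hmemR 1).2 ⟨le_rfl, by omega⟩, hpn.symm⟩
      · rw [he p, if_neg hpn, if_neg (by omega), if_pos ⟨by omega, hp2⟩,
          he p, if_neg hpn, if_neg (by omega), if_pos ⟨by omega, hp2⟩]
        exact ⟨(hmemR p).2 ⟨by omega, by omega⟩, rfl⟩
    · intro v hv
      obtain ⟨hv1, hv2⟩ := (hmemR v).1 hv
      by_cases hv1' : v = 1
      · subst hv1'
        rw [he 1, if_neg (by omega), if_pos rfl, he n, if_pos rfl]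
        exact ⟨⟨by omega, le_rfl⟩, rfl⟩
      · rw [he v, if_neg (by omega), if_neg hv1', if_pos ⟨hv1, by omega⟩,
          he v, if_neg (by omega), if_neg hv1', if_pos ⟨hv1, by omega⟩]
        exact ⟨⟨by omega, by omega⟩, rfl⟩
    · intro p hp1 hp2 v hv
      obtain ⟨hv1, hv2⟩ := (hmemR v).1 hv
      by_cases hpn : p = n
      · rw [hdu p, if_pos (Or.inr hpn), he p, if_pos hpn]
        simp only [List.mem_cons, List.mem_singleton, List.not_mem_nil, or_false]
        omega
      · rw [hdu p, if_neg (by omega), hinit p, if_pos ⟨by omega, hp2⟩,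
          he p, if_neg hpn, if_neg (by omega), if_pos ⟨by omega, hp2⟩]
        simp only [List.mem_singleton]
    · intro p q hp1 hp2 hq1 hq2
      by_cases hpn : p = n
      · rw [hdu p, if_pos (Or.inr hpn)]
        simp only [List.mem_cons, List.mem_singleton, List.not_mem_nil, or_false]
        omega
      · rw [hdu p, if_neg (by omega), hinit p, if_pos ⟨by omega, hp2⟩]
        simp only [List.mem_singleton]

-- initial list shape
theorem init_lst (n : Int) (hn : 1 ≤ n) :
    PySem.List.pySetD ((PySem.List.pyRange 0 (n + 1) 1).map (fun i => i - 1)) 1 n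
      = (-1 : Int) :: [n] ++ PySem.List.pyRange 1 n 1 := by
  have hmap : (PySem.List.pyRange 0 (n + 1) 1).map (fun i => i - 1)
      = PySem.List.pyRange (-1) n 1 := by
    rw [PySem.List.pyRange_one 0 (n + 1), PySem.List.pyRange_one (-1) n, List.map_map]
    have harg : (n + 1 - 0).toNat = (n - (-1)).toNat := by omega
    rw [harg]
    apply List.map_congr_left
    intro k _
    simp only [Function.comp_apply]
    omega
  rw [hmap, PySem.List.pyRange_one_cons (by omega : (-1 : Int) < n),
      PySem.List.pyRange_one_cons (by omega : (-1 : Int) + 1 < n)]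
  have h1 : (1 : Int) = ((1 : Nat) : Int) := rfl
  rw [h1, PySem.List.pySetD_natCast]
  norm_num

-- ===== VERDICT (by name: the statement is the Claim_ definition above) =====
theorem getKthCycle_spec : Claim_equal_getKthCycle := by
  intro n k fact _ hpre
  unfold Spec_getKthCycle
  obtain ⟨hn, -⟩ := hpre
  by_cases h1 : n = 1
  · subst h1; rfl
  · have hn2 : 2 ≤ n := by omega
    simp only [getKthCycle, getKthCycle_alt]
    rw [init_lst n hn]
    obtain ⟨hWF0, hInv0⟩ := inv_init n hn2
    exact outer_eq n fact (n - 2).toNat 2 [n] (PySem.List.pyRange 1 n 1)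
      (pvDsuUnion (pvDsuInit n) 1 n) (pvEInit n) (n - 1) k
      le_rfl (by omega) (by simp)
      (by rw [PySem.List.length_pyRange_one]; omega)
      (by omega) hWF0 hInv0 (PySem.List.nodup_pyRange_one 1 n)
      (fun v hv => by
        have := PySem.List.mem_pyRange_one.1 hv
        exact ⟨this.1, by omega⟩)
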